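-- pv_equiv track=rewrite | github.com/exajobs/coding-interview-collection | faang-codingexercises/codechallenge_016.py | strDistSubstitution
-- ===== SOURCE A (Python) =====
-- def strDistSubstitution(str1, str2):
-- 	# edge case
-- 	match_cnt = 0
-- 	if len(str1) == 0 or len(str2) == 0:
-- 		return None
--
-- 	elif len(str1) > len(str2):
-- 		try:
-- 			for i,n in enumerate(str1):
-- 				if n == str2[i]:
-- 					match_cnt+=1
-- 		except IndexError:
-- 			pass
--
-- 		return len(str1) - match_cnt
-- 	else:
-- 		try:
-- 			for i,n in enumerate(str2):
-- 				if n == str1[i]: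
-- 					match_cnt+=1
-- 		except IndexError:
-- 			pass
--
-- 		return len(str2) - match_cnt
-- ===== SOURCE B (Python) =====
-- def strDistSubstitution(str1, str2):
--     if not str1 or not str2:
--         return None
--     mismatches = sum(1 for a, b in zip(str1, str2) if a != b)
--     return mismatches + abs(len(str1) - len(str2))
-- ===== Notes on version B (the rewrite author's own statement) =====
-- stated objective: simpler
-- what changed: B counts differing positions directly over zip(str1,str2) and adds abs(len difference), instead of A's branch on which string is longer, an index loop over the longer string with a try/except IndexError truncation, and subtracting a match count from the longer length.
import Mathlib
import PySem

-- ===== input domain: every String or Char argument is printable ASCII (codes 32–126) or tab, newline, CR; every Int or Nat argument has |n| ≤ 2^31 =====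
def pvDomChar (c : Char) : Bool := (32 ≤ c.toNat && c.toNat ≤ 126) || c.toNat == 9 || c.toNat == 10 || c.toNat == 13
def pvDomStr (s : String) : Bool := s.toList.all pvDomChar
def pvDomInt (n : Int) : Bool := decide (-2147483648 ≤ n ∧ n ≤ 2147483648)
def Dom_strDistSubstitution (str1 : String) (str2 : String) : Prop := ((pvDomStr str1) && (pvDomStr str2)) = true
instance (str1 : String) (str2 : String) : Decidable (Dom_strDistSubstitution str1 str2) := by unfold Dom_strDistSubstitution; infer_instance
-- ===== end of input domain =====

-- B counts differing positions over zip(str1,str2) plus abs(len difference) instead of A's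
-- longer-string index loop with try/except truncation and match-count subtraction (objective: simpler).


-- ===== PORT A =====
-- the 'for i,n in enumerate(longer): if n == shorter[i]: match_cnt += 1' loop;
-- PySem.List.pyGet? returning none is the IndexError, which aborts the loop (try/except: pass)
def pvLoopA : List Char → List Char → Nat → Nat → Nat
  | [], _, _, cnt => cnt
  | n :: rest, shorter, i, cnt =>
    match PySem.List.pyGet? shorter (i : Int) with
    | none => cnt
    | some c => pvLoopA rest shorter (i + 1) (if n = c then cnt + 1 else cnt)

def strDistSubstitution (str1 : String) (str2 : String) : Option Int :=
  let l1 := str1.toList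
  let l2 := str2.toList
  if l1.length = 0 ∨ l2.length = 0 then none
  else if l1.length > l2.length then
    some ((l1.length : Int) - (pvLoopA l1 l2 0 0 : Int))
  else
    some ((l2.length : Int) - (pvLoopA l2 l1 0 0 : Int))

-- ===== PORT B =====
def strDistSubstitution_alt (str1 : String) (str2 : String) : Option Int :=
  let l1 := str1.toList
  let l2 := str2.toList
  if l1.isEmpty || l2.isEmpty then none
  else
    let mismatches := (l1.zip l2).foldl (fun acc p => if p.1 ≠ p.2 then acc + 1 else acc) (0 : Int)
    some (mismatches + |(l1.length : Int) - (l2.length : Int)|)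

-- ===== PRECONDITION & SPEC =====
def Spec_strDistSubstitution (str1 : String) (str2 : String) (out : Option Int) : Prop := out = strDistSubstitution_alt str1 str2
instance (str1 : String) (str2 : String) (out : Option Int) : Decidable (Spec_strDistSubstitution str1 str2 out) := by unfold Spec_strDistSubstitution; infer_instance

-- ===== CLAIM (what is proved, stated in full; the proofs are below) =====
def Claim_equal_strDistSubstitution : Prop := ∀ (str1 : String) (str2 : String), Dom_strDistSubstitution str1 str2 → Spec_strDistSubstitution str1 str2 (strDistSubstitution str1 str2)

-- ===== LEMMAS AND PROOFS =====

-- A's loop counts the equal positions of the overlap (from index i on)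
theorem pvLoopA_eq (longer : List Char) : ∀ (shorter : List Char) (i cnt : Nat),
    pvLoopA longer shorter i cnt
      = cnt + (longer.zip (shorter.drop i)).countP (fun p => p.1 = p.2) := by
  induction longer with
  | nil => intro shorter i cnt; simp [pvLoopA]
  | cons n rest ih =>
    intro shorter i cnt
    rcases h : PySem.List.pyGet? shorter (i : Int) with _ | c
    · have hlen : shorter.length ≤ i := by
        by_contra hc
        push_neg at hc
        simp [PySem.List.pyGet?_natCast, List.getElem?_eq_getElem hc] at h
      simp [pvLoopA, h, List.drop_eq_nil_of_le hlen]
    · have hi : i < shorter.length := by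
        by_contra hc
        push_neg at hc
        simp [PySem.List.pyGet?_natCast, List.getElem?_eq_none_iff.mpr hc] at h
      have hc : shorter[i] = c := by
        simpa [PySem.List.pyGet?_natCast, List.getElem?_eq_getElem hi] using h
      have hdrop : shorter.drop i = c :: shorter.drop (i + 1) := by
        rw [← hc]; exact (List.getElem_cons_drop hi).symm
      rw [pvLoopA.eq_def]
      simp only [h]
      rw [ih shorter (i + 1), hdrop, List.zip_cons_cons, List.countP_cons]
      by_cases hnc : n = c
      · have hd : (if (fun p : Char × Char => decide (p.1 = p.2)) (n, c) = true then 1 else 0) = 1 := by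
          simp [hnc]
        rw [if_pos hnc, hd]
        omega
      · have hd : (if (fun p : Char × Char => decide (p.1 = p.2)) (n, c) = true then 1 else 0) = 0 := by
          simp [hnc]
        rw [if_neg hnc, hd]
        omega

-- B's fold counts the differing positions of the overlap
theorem foldB_eq (l : List (Char × Char)) : ∀ (acc : Int),
    l.foldl (fun acc p => if p.1 ≠ p.2 then acc + 1 else acc) acc
      = acc + (l.countP (fun p => ¬ p.1 = p.2) : Int) := by
  induction l with
  | nil => intro acc; simp
  | cons p rest ih =>
    intro acc
    rw [List.foldl_cons, ih, List.countP_cons]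
    by_cases h : p.1 = p.2
    · have hd : (if (fun p : Char × Char => decide (¬ p.1 = p.2)) p = true then 1 else 0) = 0 := by
        simp [h]
      rw [if_neg (not_not_intro h), hd]
      omega
    · have hd : (if (fun p : Char × Char => decide (¬ p.1 = p.2)) p = true then 1 else 0) = 1 := by
        simp [h]
      rw [if_pos h, hd]
      omega

-- counting equal pairs is symmetric in the zip order
theorem countP_zip_comm (l1 : List Char) : ∀ (l2 : List Char),
    (l2.zip l1).countP (fun p => p.1 = p.2) = (l1.zip l2).countP (fun p => p.1 = p.2) := by
  induction l1 with
  | nil => intro l2; simp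
  | cons a r1 ih =>
    intro l2
    cases l2 with
    | nil => simp
    | cons b r2 =>
      rw [List.zip_cons_cons, List.zip_cons_cons, List.countP_cons, List.countP_cons, ih]
      by_cases h : a = b
      · have h1 : decide ((b, a).1 = (b, a).2) = true := by simp [h.symm]
        have h2 : decide ((a, b).1 = (a, b).2) = true := by simp [h]
        rw [h1, h2]
      · have h1 : decide ((b, a).1 = (b, a).2) = false := by simp [Ne.symm h]
        have h2 : decide ((a, b).1 = (a, b).2) = false := by simp [h]
        rw [h1, h2]

-- equal + differing pairs = overlap length
theorem countP_split (l : List (Char × Char)) :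
    l.countP (fun p => p.1 = p.2) + l.countP (fun p => ¬ p.1 = p.2) = l.length := by
  induction l with
  | nil => simp
  | cons p rest ih =>
    rw [List.countP_cons, List.countP_cons, List.length_cons]
    by_cases h : p.1 = p.2
    · have h1 : (if (fun p : Char × Char => decide (p.1 = p.2)) p = true then 1 else 0) = 1 := by
        simp [h]
      have h2 : (if (fun p : Char × Char => decide (¬ p.1 = p.2)) p = true then 1 else 0) = 0 := by
        simp [h]
      rw [h1, h2]
      omega
    · have h1 : (if (fun p : Char × Char => decide (p.1 = p.2)) p = true then 1 else 0) = 0 := by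
        simp [h]
      have h2 : (if (fun p : Char × Char => decide (¬ p.1 = p.2)) p = true then 1 else 0) = 1 := by
        simp [h]
      rw [h1, h2]
      omega

-- ===== VERDICT (by name: the statement is the Claim_ definition above) =====
theorem strDistSubstitution_spec : Claim_equal_strDistSubstitution := by
  intro str1 str2 _
  simp only [Spec_strDistSubstitution, strDistSubstitution, strDistSubstitution_alt]
  by_cases h1 : str1.toList = []
  · simp [h1]
  by_cases h2 : str2.toList = []
  · simp [h2]
  have hA : ¬ (str1.toList.length = 0 ∨ str2.toList.length = 0) := by
    simp only [List.length_eq_zero_iff]; tauto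
  have hB : ¬ ((str1.toList.isEmpty || str2.toList.isEmpty) = true) := by
    simp only [Bool.or_eq_true, List.isEmpty_iff]; tauto
  rw [if_neg hA, if_neg hB, foldB_eq]
  have hsplit := countP_split (str1.toList.zip str2.toList)
  have hzlen : (str1.toList.zip str2.toList).length
      = min str1.toList.length str2.toList.length := List.length_zip ..
  by_cases hgt : str1.toList.length > str2.toList.length
  · rw [if_pos hgt, pvLoopA_eq, List.drop_zero]
    have habs : |(str1.toList.length : Int) - (str2.toList.length : Int)|
        = (str1.toList.length : Int) - str2.toList.length := by
      rw [abs_of_nonneg]; omega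
    rw [habs]
    simp only [Option.some.injEq]
    omega
  · rw [if_neg hgt, pvLoopA_eq, List.drop_zero, countP_zip_comm]
    have habs : |(str1.toList.length : Int) - (str2.toList.length : Int)|
        = (str2.toList.length : Int) - str1.toList.length := by
      rw [abs_of_nonpos (by omega)]; ring
    rw [habs]
    simp only [Option.some.injEq]
    omega
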